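-- pv_equiv track=rewrite | github.com/joohyun333/programmers | 리트코드/아룸다움.py | solution
-- ===== SOURCE A (Python) =====
-- def solution(s:str) -> int:
--     result = []
--     for i in range(len(s)+1):
--         for j in range(i,len(s)):
--             result.append(s[i:j+1])
--     result_1 = len([j for j in result if len(set(j)) > 1 and len(j) == 2])
--     result = [j for j in result if len(set(j)) > 1 and len(j)>2]
--     answer = [0] * len(result) #['ba', 'bab', 'baby', 'ab', 'aby', 'by']
--     for i, z in enumerate(result):
--         for c in range(len(z)-1,0,-1):
--             if z[0] != z[c]:
--                 answer[i] += len(z[0:c])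
--                 break
--     return sum(answer)+ result_1
-- ===== SOURCE B (Python) =====
-- def solution(s: str) -> int:
--     # One pass per start: track the last position differing from s[i]; O(n^2) vs A's O(n^3).
--     n = len(s)
--     total = 0
--     for i in range(n):
--         last = 0
--         for j in range(i + 1, n):
--             if s[j] != s[i]:
--                 last = j - i
--             total += last
--     return total
-- ===== Notes on version B (the rewrite author's own statement) =====
-- stated objective: faster
-- what changed: Instead of materializing every substring and re-scanning each one backwards for its last index differing from its first character, B makes one incremental pass per start index, updating the last differing offset and adding it for each end position.
import Mathlib
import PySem

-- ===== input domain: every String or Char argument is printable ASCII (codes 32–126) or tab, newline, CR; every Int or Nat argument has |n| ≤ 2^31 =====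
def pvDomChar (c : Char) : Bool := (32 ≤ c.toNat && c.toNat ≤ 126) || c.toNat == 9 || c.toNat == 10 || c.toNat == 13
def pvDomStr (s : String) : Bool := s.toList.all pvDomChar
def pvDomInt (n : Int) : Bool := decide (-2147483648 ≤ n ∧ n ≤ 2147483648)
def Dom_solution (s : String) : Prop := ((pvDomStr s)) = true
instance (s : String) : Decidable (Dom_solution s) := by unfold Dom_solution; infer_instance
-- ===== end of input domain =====

-- B replaces A's enumeration of all substrings (and per-substring backward scan) by one
-- incremental pass per start index that tracks the last position differing from s[i]: O(n^2) vs O(n^3).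

-- ===== PORT A =====
-- inner 'for c in range(len(z)-1,0,-1): if z[0] != z[c]: answer[i] += len(z[0:c]); break'
def aInner (z : List Char) : List Int → Int
  | [] => 0
  | c :: cs =>
    if PySem.List.pyGet? z 0 ≠ PySem.List.pyGet? z c then
      PySem.List.len (PySem.List.slice z (some 0) (some c))
    else aInner z cs

def solution (s : String) : Int :=
  let l := s.toList
  let n := PySem.List.len l
  let result : List (List Char) :=
    (PySem.List.pyRange 0 (n + 1) 1).foldl
      (fun acc i =>
        (PySem.List.pyRange i n 1).foldl
          (fun acc2 j => acc2 ++ [PySem.List.slice l (some i) (some (j + 1))]) acc)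
      []
  let result1 : Int :=
    PySem.List.len (result.filter
      (fun z => decide (1 < (PySem.Set.ofList z).length) && decide (PySem.List.len z = 2)))
  let result2 : List (List Char) :=
    result.filter (fun z => decide (1 < (PySem.Set.ofList z).length) && decide (2 < PySem.List.len z))
  -- answer[i] starts at 0 and each slot is written only by its own iteration: map of the inner loop
  let answer : List Int :=
    result2.map (fun z => aInner z (PySem.List.pyRange (PySem.List.len z - 1) 0 (-1)))
  answer.sum + result1

-- ===== PORT B =====
def solution_alt (s : String) : Int :=
  let l := s.toList
  let n := PySem.List.len l
  (PySem.List.pyRange 0 n 1).foldl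
    (fun total i =>
      ((PySem.List.pyRange (i + 1) n 1).foldl
        (fun st j =>
          let last := if PySem.List.pyGetD l j ' ' ≠ PySem.List.pyGetD l i ' ' then j - i else st.1
          (last, st.2 + last))
        ((0 : Int), total)).2)
    0

-- ===== PRECONDITION & SPEC =====
def Spec_solution (s : String) (out : Int) : Prop := out = solution_alt s
instance (s : String) (out : Int) : Decidable (Spec_solution s out) := by unfold Spec_solution; infer_instance

-- ===== CLAIM (what is proved, stated in full; the proofs are below) =====
def Claim_equal_solution : Prop := ∀ (s : String), Dom_solution s → Spec_solution s (solution s)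

-- ===== LEMMAS AND PROOFS =====

-- last index c ∈ [1,k] with l[i+c] ≠ l[i], else 0 (via getD, exactly B's comparison)
def gL (l : List Char) (i : Nat) : Nat → Int
  | 0 => 0
  | c+1 => if l.getD (i+c+1) ' ' ≠ l.getD i ' ' then ((c : Int)+1) else gL l i c

-- per-substring contribution as A computes it
def Fz (z : List Char) : Int :=
  (if (decide (1 < (PySem.Set.ofList z).length) && decide (2 < PySem.List.len z)) = true then
      aInner z (PySem.List.pyRange (PySem.List.len z - 1) 0 (-1)) else 0)
  + (if (decide (1 < (PySem.Set.ofList z).length) && decide (PySem.List.len z = 2)) = true then 1 else 0)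

def specI (l : List Char) (i : Nat) : Int :=
  ((List.range (l.length - i)).map (fun k => gL l i k)).sum

lemma foldl_append_flatMap {α β : Type} (h : α → List β) (L : List α) (init : List β) :
    L.foldl (fun acc x => acc ++ h x) init = init ++ L.flatMap h := by
  induction L generalizing init with
  | nil => simp
  | cons x xs ih => simp [List.foldl_cons, ih]

lemma sum_map_filter_eq {α : Type} (p : α → Bool) (f : α → Int) (L : List α) :
    ((L.filter p).map f).sum = (L.map (fun z => if p z = true then f z else 0)).sum := by
  induction L with
  | nil => simp
  | cons x xs ih => by_cases h : p x = true <;> simp [h, ih]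

lemma sum_map_flatMap {α β : Type} (h : α → List β) (F : β → Int) (L : List α) :
    (((L.flatMap h).map F)).sum = (L.map (fun x => ((h x).map F).sum)).sum := by
  induction L with
  | nil => simp
  | cons x xs ih => simp [List.flatMap_cons, ih]

lemma setlen_le_one {z : List Char} (h : (PySem.Set.ofList z).length ≤ 1) :
    ∀ x ∈ z, ∀ y ∈ z, x = y := by
  intro x hx y hy
  have hx' : x ∈ PySem.Set.ofList z := (PySem.Set.mem_ofList z x).mpr hx
  have hy' : y ∈ PySem.Set.ofList z := (PySem.Set.mem_ofList z y).mpr hy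
  rcases hw : PySem.Set.ofList z with _ | ⟨a, _ | ⟨b, t⟩⟩
  · rw [hw] at hx'; simp at hx'
  · rw [hw] at hx' hy'; simp at hx' hy'; rw [hx', hy']
  · rw [hw] at h; simp at h

lemma one_lt_setlen {z : List Char} {x y : Char} (hx : x ∈ z) (hy : y ∈ z) (hne : x ≠ y) :
    1 < (PySem.Set.ofList z).length := by
  by_contra h
  exact hne (setlen_le_one (Nat.le_of_not_lt h) x hx y hy)

lemma gL_congr (z l : List Char) (i : Nat) :
    ∀ c, (∀ c' ≤ c, z.getD c' ' ' = l.getD (i+c') ' ') → gL z 0 c = gL l i c := by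
  intro c
  induction c with
  | zero => intro _; rfl
  | succ c ih =>
    intro h
    have h0 := h 0 (Nat.zero_le _)
    rw [Nat.add_zero] at h0
    have hc := h (c+1) (Nat.le_refl _)
    simp only [gL, Nat.zero_add, h0, hc]
    rw [ih (fun c' hc' => h c' (Nat.le_succ_of_le hc')), Nat.add_assoc i c 1]

lemma gL_zero_of_const {z : List Char} (hall : ∀ x ∈ z, ∀ y ∈ z, x = y) :
    ∀ c, c < z.length → gL z 0 c = 0 := by
  intro c
  induction c with
  | zero => intro _; rfl
  | succ c ih =>
    intro hlt
    have h1 : c + 1 < z.length := hlt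
    have h0 : 0 < z.length := by omega
    have : z.getD (0+c+1) ' ' = z.getD 0 ' ' := by
      rw [List.getD_eq_getElem z ' ' (by omega : 0+c+1 < z.length), List.getD_eq_getElem z ' ' h0]
      exact hall _ (z.getElem_mem _) _ (z.getElem_mem _)
    simp only [gL, this, ne_eq, not_true_eq_false, if_false]
    exact ih (by omega)

lemma aInner_eq (z : List Char) :
    ∀ c, c < z.length → aInner z (PySem.List.pyRange (c : Int) 0 (-1)) = gL z 0 c := by
  intro c
  induction c with
  | zero =>
    intro _
    simp only [Nat.cast_zero]
    rw [PySem.List.pyRange_neg_one_eq_nil (le_refl 0)]; rfl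
  | succ c ih =>
    intro hlt
    have hpos : (0 : Int) < ((c+1 : Nat) : Int) := by push_cast; omega
    rw [PySem.List.pyRange_neg_one_cons hpos]
    have hstep : ((c+1 : Nat) : Int) - 1 = (c : Int) := by push_cast; ring
    rw [hstep]
    have hz0 : PySem.List.pyGet? z (0 : Int) = some (z.getD 0 ' ') := by
      have h00 : ((0:Nat) : Int) = (0 : Int) := rfl
      rw [← h00, PySem.List.pyGet?_natCast, List.getElem?_eq_getElem (by omega : 0 < z.length),
        List.getD_eq_getElem z ' ' (by omega : 0 < z.length)]
    have hzc : PySem.List.pyGet? z ((c+1 : Nat) : Int) = some (z.getD (c+1) ' ') := by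
      rw [PySem.List.pyGet?_natCast, List.getElem?_eq_getElem hlt, List.getD_eq_getElem z ' ' hlt]
    simp only [aInner, hz0, hzc, ne_eq, Option.some.injEq]
    by_cases h : z.getD (c+1) ' ' = z.getD 0 ' '
    · simp only [h, not_true_eq_false, if_false, gL, Nat.zero_add, ne_eq, not_true_eq_false]
      exact ih (by omega)
    · have hne : ¬ z.getD 0 ' ' = z.getD (c+1) ' ' := fun he => h he.symm
      simp only [hne, not_false_eq_true, if_true, gL, Nat.zero_add, h, ne_eq]
      rw [PySem.List.slice_zero_start, PySem.List.slice_to_natCast]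
      norm_num [PySem.List.len_eq, List.length_take]
      omega

lemma getD_take_drop (l : List Char) (i k c : Nat) (hc : c ≤ k) (h : i + k < l.length) :
    ((l.drop i).take (k+1)).getD c ' ' = l.getD (i+c) ' ' := by
  rw [List.getD_eq_getElem?_getD, List.getD_eq_getElem?_getD, List.getElem?_take,
    if_pos (by omega : c < k+1), List.getElem?_drop]

lemma setlen_pair_iff (a b : Char) : 1 < (PySem.Set.ofList [a, b]).length ↔ b ≠ a := by
  constructor
  · intro hs hne
    rw [hne] at hs
    rw [show PySem.Set.ofList [a, a] = [a] by
      simp [PySem.Set.ofList_cons, PySem.Set.ofList_nil, PySem.Set.discard]] at hs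
    simp at hs
  · intro hne
    exact one_lt_setlen (z := [a, b]) (x := b) (y := a) (by simp) (by simp) hne

lemma Fz_eq_gL_aux (l : List Char) (i k : Nat) (z : List Char)
    (hlen : z.length = k + 1)
    (hget : ∀ c ≤ k, z.getD c ' ' = l.getD (i+c) ' ') :
    Fz z = gL l i k := by
  match k, hlen, hget with
  | 0, hlen, hget =>
    norm_num [Fz, gL, PySem.List.len_eq, hlen]
  | 1, hlen, hget =>
    obtain ⟨a, b, hab⟩ := List.length_eq_two.mp hlen
    subst hab
    have hga := hget 0 (by omega)
    have hgb := hget 1 (le_refl 1)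
    simp only [List.getD_cons_zero, List.getD_cons_succ] at hga hgb
    rw [Nat.add_zero] at hga
    have hgl : gL l i 1 = if l.getD (i+1) ' ' ≠ l.getD i ' ' then 1 else 0 := by
      simp [gL]
    by_cases hd : b = a
    · have hs : ¬ 1 < (PySem.Set.ofList [a, b]).length := fun hh => (setlen_pair_iff a b).mp hh hd
      have hd' : l.getD (i+1) ' ' = l.getD i ' ' := by rw [← hga, ← hgb, hd]
      have hd2 := hd'
      simp only [List.getD_eq_getElem?_getD] at hd2
      norm_num [Fz, PySem.List.len_eq, hs, hgl, hd', hd2]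
    · have hs : 1 < (PySem.Set.ofList [a, b]).length := (setlen_pair_iff a b).mpr hd
      have hd' : l.getD (i+1) ' ' ≠ l.getD i ' ' := by
        rw [hga, hgb] at hd; exact hd
      have hd2 := hd'
      simp only [List.getD_eq_getElem?_getD] at hd2
      norm_num [Fz, PySem.List.len_eq, hs, hgl, hd', hd2]
  | (k+2), hlen, hget =>
    have hc2 : ¬ (PySem.List.len z = 2) := by
      rw [PySem.List.len_eq, hlen]; push_cast; omega
    have hc3 : 2 < PySem.List.len z := by
      rw [PySem.List.len_eq, hlen]; push_cast; omega
    have hlm1 : PySem.List.len z - 1 = ((k+2 : Nat) : Int) := by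
      rw [PySem.List.len_eq, hlen]; push_cast; ring
    have hbody : aInner z (PySem.List.pyRange (PySem.List.len z - 1) 0 (-1)) = gL l i (k+2) := by
      rw [hlm1, aInner_eq z (k+2) (by omega)]
      exact gL_congr z l i (k+2) (fun c' hc' => hget c' hc')
    by_cases hs : 1 < (PySem.Set.ofList z).length
    · simp only [Fz, hc2, hc3, hs, decide_true, decide_false, Bool.and_true, Bool.and_false,
        decide_eq_false hc2, Bool.true_and, if_true, if_false, ite_false, hbody, add_zero,
        Bool.false_eq_true]
    · simp only [Fz, hs, decide_false, Bool.false_and, if_false, ite_false, add_zero, zero_add]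
      rw [← gL_congr z l i (k+2) (fun c' hc' => hget c' hc')]
      exact (gL_zero_of_const (setlen_le_one (Nat.le_of_not_lt hs)) (k+2) (by omega)).symm

lemma Fz_eq_gL (l : List Char) (i k : Nat) (h : i + k < l.length) :
    Fz ((l.drop i).take (k+1)) = gL l i k := by
  refine Fz_eq_gL_aux l i k _ ?_ (fun c hc => getD_take_drop l i k c hc h)
  simp [List.length_take, List.length_drop]; omega

-- ===== A equals the spec sum =====

lemma innerSum (l : List Char) (i : Nat) (hin : i ≤ l.length) :
    ((PySem.List.pyRange (i : Int) (l.length : Int) 1).map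
      (fun j => Fz (PySem.List.slice l (some (i : Int)) (some (j+1))))).sum = specI l i := by
  rw [PySem.List.pyRange_one]
  have ht : ((l.length : Int) - (i : Int)).toNat = l.length - i := by omega
  rw [ht, List.map_map]
  unfold specI
  congr 1
  apply List.map_congr_left
  intro k hk
  have hk' : k < l.length - i := List.mem_range.mp hk
  have hcast : (i : Int) + (k : Int) + 1 = ((i + k + 1 : Nat) : Int) := by push_cast; ring
  simp only [Function.comp, hcast]
  rw [PySem.List.slice_natCast l i (i+k+1)]
  have h2 : i + k + 1 - i = k + 1 := by omega
  rw [h2]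
  exact Fz_eq_gL l i k (by omega)

lemma A_eq_spec (s : String) :
    solution s = ((List.range s.toList.length).map (fun i => specI s.toList i)).sum := by
  simp only [solution]
  set l := s.toList with hl
  simp only [PySem.List.foldl_append_singleton_eq_map]
  rw [foldl_append_flatMap, List.nil_append]
  set R := (PySem.List.pyRange 0 (PySem.List.len l + 1) 1).flatMap
    (fun i => (PySem.List.pyRange i (PySem.List.len l) 1).map
      (fun j => PySem.List.slice l (some i) (some (j + 1)))) with hR
  set pB := fun z : List Char =>
    decide (1 < (PySem.Set.ofList z).length) && decide (PySem.List.len z = 2) with hpB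
  set pA := fun z : List Char =>
    decide (1 < (PySem.Set.ofList z).length) && decide (2 < PySem.List.len z) with hpA
  set bodyA := fun z : List Char =>
    aInner z (PySem.List.pyRange (PySem.List.len z - 1) 0 (-1)) with hbody
  have h1 : PySem.List.len (R.filter pB) = (R.map (fun z => if pB z = true then (1:Int) else 0)).sum := by
    rw [PySem.List.len_eq, PySem.List.sum_map_ite_one_zero, List.countP_eq_length_filter]
  have h2 : ((R.filter pA).map bodyA).sum = (R.map (fun z => if pA z = true then bodyA z else 0)).sum :=
    sum_map_filter_eq pA bodyA R
  rw [h1, h2, ← PySem.List.sum_map_add_int]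
  have hFz : (fun z => (if pA z = true then bodyA z else 0) + if pB z = true then (1:Int) else 0) = Fz := by
    funext z; rfl
  rw [hFz, hR, sum_map_flatMap]
  have hcast1 : (PySem.List.len l + 1) = ((l.length + 1 : Nat) : Int) := by
    rw [PySem.List.len_eq]; push_cast; ring
  rw [hcast1, PySem.List.pyRange_zero_nat, List.map_map]
  have hmc : ∀ i ∈ List.range (l.length + 1),
      ((fun x => (((PySem.List.pyRange x (PySem.List.len l) 1).map
          (fun j => PySem.List.slice l (some x) (some (j + 1)))).map Fz).sum) ∘ (fun k : Nat => (k : Int))) i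
        = specI l i := by
    intro i hi
    have hle : i ≤ l.length := by have := List.mem_range.mp hi; omega
    have h0 := innerSum l i hle
    simp only [Function.comp, List.map_map, PySem.List.len_eq]
    simp only [Function.comp_def]
    exact h0
  rw [List.map_congr_left hmc, List.range_succ, List.map_append, List.sum_append]
  have hlast : specI l l.length = 0 := by
    unfold specI; rw [Nat.sub_self]; simp
  simp [hlast]

-- ===== B equals the spec sum =====

lemma B_inner (l : List Char) (i : Nat) :
    ∀ (t : Nat) (T : Int),
      ((List.range t).map (fun k : Nat => (i : Int) + 1 + (k : Int))).foldl
        (fun st j =>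
          let last := if PySem.List.pyGetD l j ' ' ≠ PySem.List.pyGetD l (i : Int) ' ' then j - (i : Int) else st.1
          (last, st.2 + last)) ((0 : Int), T)
      = (gL l i t, T + ((List.range t).map (fun k => gL l i (k+1))).sum) := by
  intro t
  induction t with
  | zero => intro T; simp [gL]
  | succ t ih =>
    intro T
    rw [List.range_succ, List.map_append, List.foldl_append, ih]
    have hcast : ((i : Int) + 1 + (t : Int)) = ((i + t + 1 : Nat) : Int) := by push_cast; ring
    have hsum : ((List.range t ++ [t]).map (fun k => gL l i (k+1))).sum
        = ((List.range t).map (fun k => gL l i (k+1))).sum + gL l i (t+1) := by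
      rw [List.map_append, List.sum_append]; simp
    rw [hsum]
    simp only [List.map_cons, List.map_nil, List.foldl_cons, List.foldl_nil, hcast,
      PySem.List.pyGetD_natCast]
    have hgl : gL l i (t+1) = if l.getD (i+t+1) ' ' ≠ l.getD i ' ' then ((t : Int)+1) else gL l i t := rfl
    rw [hgl]
    by_cases hd : l.getD (i+t+1) ' ' ≠ l.getD i ' '
    · simp only [hd, ite_true, Prod.mk.injEq]
      constructor <;> (try push_cast) <;> ring
    · simp only [hd, ite_false, Prod.mk.injEq]
      constructor <;> (try push_cast) <;> ring

lemma B_outer (l : List Char) :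
    ∀ (m : Nat), m ≤ l.length → ∀ (T : Int),
      ((List.range m).map (fun k : Nat => (k : Int))).foldl
        (fun total i =>
          ((PySem.List.pyRange (i + 1) (l.length : Int) 1).foldl
            (fun st j =>
              let last := if PySem.List.pyGetD l j ' ' ≠ PySem.List.pyGetD l i ' ' then j - i else st.1
              (last, st.2 + last)) ((0 : Int), total)).2) T
      = T + ((List.range m).map (fun i => specI l i)).sum := by
  intro m
  induction m with
  | zero => intro _ T; simp
  | succ m ih =>
    intro hm T
    rw [List.range_succ, List.map_append, List.foldl_append, ih (by omega)]
    simp only [List.map_cons, List.map_nil, List.foldl_cons, List.foldl_nil,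
      List.map_append, List.sum_append, List.sum_cons, List.sum_nil]
    rw [PySem.List.pyRange_one]
    have ht : ((l.length : Int) - ((m : Int) + 1)).toNat = l.length - m - 1 := by omega
    have hmap : (List.range (((l.length : Int) - ((m : Int) + 1)).toNat)).map
        (fun k : Nat => (m : Int) + 1 + (k : Int)) = (List.range (l.length - m - 1)).map
        (fun k : Nat => ((m : Int)) + 1 + (k : Int)) := by rw [ht]
    rw [hmap, B_inner l m (l.length - m - 1)]
    have hspec : specI l m = ((List.range (l.length - m - 1)).map (fun k => gL l m (k+1))).sum := by
      unfold specI
      have : l.length - m = (l.length - m - 1) + 1 := by omega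
      rw [this, List.range_succ_eq_map, List.map_cons, List.map_map, List.sum_cons]
      rw [show gL l m 0 = (0:Int) from rfl, zero_add]
      rfl
    rw [hspec]
    ring

lemma B_eq_spec (s : String) :
    solution_alt s = ((List.range s.toList.length).map (fun i => specI s.toList i)).sum := by
  simp only [solution_alt, PySem.List.len_eq]
  rw [show ((s.toList.length : Int)) = (((s.toList.length : Nat) : Int)) from rfl,
    PySem.List.pyRange_zero_nat]
  rw [B_outer s.toList s.toList.length (le_refl _) 0]
  ring

-- ===== VERDICT (by name: the statement is the Claim_ definition above) =====
theorem solution_spec : Claim_equal_solution := by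
  intro s _
  unfold Spec_solution
  rw [A_eq_spec, B_eq_spec]
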